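-- pv_equiv track=rewrite | github.com/pisterlabs/promptset | data/scraping/repos/ashrielbrian~video_search/summary.py | get_segments_from_topic
-- ===== SOURCE A (Python) =====
-- from typing import List, Dict, Tuple, Union
--
-- def get_segments_from_topic(
--     chunk_topics: List[int], chunks: List[Dict], num_topics: int
-- ) -> List[List[int]]:
--     """Returns all the segments IDs related to each topic.
--     In order to generate summaries, we collate segments into chunks,
--     and from chunks, we use the louvain algorithm to generate topics:
--       i.e. segments -> chunks -> topics.
--
--     We want to associate each topic generated with the source segment.
--     Inputs:
--         chunk_topics:
--             chunk_topics[i] returns the topic ID associated to the i'th chunk.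
--         chunks:
--             Dict of the chunks containing the start and end segment IDs that
--             make up this chunk.
--         num_topics:
--             Number of total topics generated from louvain community algo.
--     """
--     assert len(chunk_topics) == len(chunks)
--
--     topic_segments = [[] for _ in range(num_topics)]
--
--     for chunk_i in range(len(chunk_topics)):
--         topic = chunk_topics[chunk_i]
--         curr_chunk = chunks[chunk_i]
--         segment_ids = list(
--             range(curr_chunk["start_segment"], curr_chunk["end_segment"] + 1)
--         )
--         topic_segments[topic].extend(segment_ids)
--
--     # sort the segment IDs for each topic and remove duplicate segments
--     for i, segment_ids in enumerate(topic_segments):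
--         topic_segments[i] = sorted(list(set(segment_ids)))
--
--     return topic_segments
-- ===== SOURCE B (Python) =====
-- def get_segments_from_topic(chunk_topics, chunks, num_topics):
--     assert len(chunk_topics) == len(chunks)
--
--     # one pass: collect raw (start, end) interval pairs per topic
--     topic_intervals = [[] for _ in range(num_topics)]
--     for topic, chunk in zip(chunk_topics, chunks):
--         topic_intervals[topic].append((chunk["start_segment"], chunk["end_segment"]))
--
--     # per topic: sort intervals, merge overlapping/touching ones, expand once
--     out = []
--     for intervals in topic_intervals:
--         intervals.sort(key=lambda iv: iv[0])
--         merged = []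
--         for s, e in intervals:
--             if merged and s <= merged[-1][1] + 1:
--                 if e > merged[-1][1]:
--                     merged[-1] = (merged[-1][0], e)
--             else:
--                 if s <= e:
--                     merged.append((s, e))
--         out.append([i for s, e in merged for i in range(s, e + 1)])
--     return out
-- ===== Notes on version B (the rewrite author's own statement) =====
-- stated objective: alternative
-- what changed: Instead of expanding every chunk's segment range into explicit IDs and sort+dedup the concatenated ID lists per topic, B collects raw (start,end) interval pairs per topic in one pass, sorts the few intervals by start, merges overlapping/touching ones and expands the merged disjoint intervals once, which is already sorted and duplicate-free.
import Mathlib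
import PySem

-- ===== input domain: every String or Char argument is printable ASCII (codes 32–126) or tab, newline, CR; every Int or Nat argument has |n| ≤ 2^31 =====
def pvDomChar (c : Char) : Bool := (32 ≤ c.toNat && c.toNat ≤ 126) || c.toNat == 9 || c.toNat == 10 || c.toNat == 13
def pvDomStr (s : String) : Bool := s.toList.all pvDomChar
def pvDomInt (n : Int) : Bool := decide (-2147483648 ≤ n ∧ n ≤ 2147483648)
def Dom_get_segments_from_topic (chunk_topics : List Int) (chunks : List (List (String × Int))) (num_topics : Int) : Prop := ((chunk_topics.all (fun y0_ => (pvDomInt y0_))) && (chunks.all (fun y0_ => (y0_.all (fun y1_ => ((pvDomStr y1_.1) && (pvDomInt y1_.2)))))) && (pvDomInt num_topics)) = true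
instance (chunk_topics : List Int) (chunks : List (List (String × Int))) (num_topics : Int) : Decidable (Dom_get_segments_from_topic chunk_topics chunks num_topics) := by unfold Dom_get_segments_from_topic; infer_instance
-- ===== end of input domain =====

-- B collects (start,end) interval pairs per topic in one pass, then sorts, merges and expands
-- them per topic, instead of A's expand-extend-then-sort+dedup of explicit ID lists (alternative decomposition).


-- ===== PORT A =====
def get_segments_from_topic (chunk_topics : List Int) (chunks : List (List (String × Int))) (num_topics : Int) : List (List Int) :=
  let topic_segments : List (List Int) := (PySem.List.pyRange 0 num_topics 1).map (fun _ => ([] : List Int))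
  let topic_segments := (PySem.List.pyRange 0 (PySem.List.len chunk_topics) 1).foldl
    (fun acc chunk_i =>
      let topic := PySem.List.pyGetD chunk_topics chunk_i 0
      let curr_chunk := PySem.Dict.mk (PySem.List.pyGetD chunks chunk_i [])
      let segment_ids := PySem.List.pyRange (curr_chunk.getD "start_segment" 0) (curr_chunk.getD "end_segment" 0 + 1) 1
      PySem.List.pySetD acc topic (PySem.List.pyGetD acc topic [] ++ segment_ids)) topic_segments
  topic_segments.map (fun segment_ids => PySem.List.sorted (PySem.Set.ofList segment_ids) (fun x => x) false)

-- ===== PORT B =====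
-- one step of Source B's interval-merge loop (merged[-1] is getLast?, merged[:-1] is dropLast)
def pvMergeStep (merged : List (Int × Int)) (p : Int × Int) : List (Int × Int) :=
  match merged.getLast? with
  | some q =>
      if p.1 ≤ q.2 + 1 then
        (if q.2 < p.2 then merged.dropLast ++ [(q.1, p.2)] else merged)
      else
        (if p.1 ≤ p.2 then merged ++ [p] else merged)
  | none => if p.1 ≤ p.2 then merged ++ [p] else merged

-- per-topic body of Source B's output loop: sort intervals by start, merge, expand
def pvExpandTopic (intervals : List (Int × Int)) : List Int :=
  let ivs := PySem.List.sorted intervals (fun iv => iv.1) false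
  let merged := ivs.foldl pvMergeStep []
  merged.foldl (fun out p => out ++ PySem.List.pyRange p.1 (p.2 + 1) 1) []

def get_segments_from_topic_alt (chunk_topics : List Int) (chunks : List (List (String × Int))) (num_topics : Int) : List (List Int) :=
  let topic_intervals : List (List (Int × Int)) := (PySem.List.pyRange 0 num_topics 1).map (fun _ => ([] : List (Int × Int)))
  let topic_intervals := (chunk_topics.zip chunks).foldl
    (fun acc tc =>
      let d := PySem.Dict.mk tc.2
      PySem.List.pySetD acc tc.1
        (PySem.List.pyGetD acc tc.1 [] ++ [(d.getD "start_segment" 0, d.getD "end_segment" 0)])) topic_intervals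
  topic_intervals.map pvExpandTopic

-- ===== PRECONDITION & SPEC =====
-- Pre_ excludes exactly the inputs where the Python A raises: the assert (unequal lengths),
-- KeyError (a chunk missing "start_segment"/"end_segment") and IndexError (a topic outside
-- the Python index range of the num_topics-sized list; negative topics down to -num_topics wrap and return).
def Pre_get_segments_from_topic (chunk_topics : List Int) (chunks : List (List (String × Int))) (num_topics : Int) : Prop :=
  chunk_topics.length = chunks.length ∧
  (∀ t ∈ chunk_topics, PySem.Raise.InRange num_topics.toNat t) ∧
  (∀ c ∈ chunks, (PySem.Dict.mk c).contains "start_segment" = true ∧ (PySem.Dict.mk c).contains "end_segment" = true)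
instance (chunk_topics : List Int) (chunks : List (List (String × Int))) (num_topics : Int) : Decidable (Pre_get_segments_from_topic chunk_topics chunks num_topics) := by unfold Pre_get_segments_from_topic; infer_instance

def pvWitness_get_segments_from_topic : List Int × (List (List (String × Int))) × Int :=
  ([0, 1, 0],
   [[("start_segment", 1), ("end_segment", 3)],
    [("start_segment", 5), ("end_segment", 5)],
    [("start_segment", 2), ("end_segment", 4)]],
   2)

def Spec_get_segments_from_topic (chunk_topics : List Int) (chunks : List (List (String × Int))) (num_topics : Int) (out : List (List Int)) : Prop := out = get_segments_from_topic_alt chunk_topics chunks num_topics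
instance (chunk_topics : List Int) (chunks : List (List (String × Int))) (num_topics : Int) (out : List (List Int)) : Decidable (Spec_get_segments_from_topic chunk_topics chunks num_topics out) := by unfold Spec_get_segments_from_topic; infer_instance

-- ===== CLAIM (what is proved, stated in full; the proofs are below) =====
def Claim_equal_get_segments_from_topic : Prop := ∀ (chunk_topics : List Int) (chunks : List (List (String × Int))) (num_topics : Int), Dom_get_segments_from_topic chunk_topics chunks num_topics → Pre_get_segments_from_topic chunk_topics chunks num_topics → Spec_get_segments_from_topic chunk_topics chunks num_topics (get_segments_from_topic chunk_topics chunks num_topics)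

-- ===== LEMMAS AND PROOFS =====

-- the segment IDs denoted by a list of (start, end) intervals
def pvRangesOf (ivs : List (Int × Int)) : List Int :=
  ivs.flatMap (fun p => PySem.List.pyRange p.1 (p.2 + 1) 1)

-- a merged accumulator: valid intervals, strictly separated (touching intervals are merged)
def pvChain (M : List (Int × Int)) : Prop :=
  M.Pairwise (fun p q => p.2 + 1 < q.1) ∧ ∀ p ∈ M, p.1 ≤ p.2

theorem pvRangesOf_nil : pvRangesOf [] = [] := rfl

theorem mem_pvRangesOf (ivs : List (Int × Int)) (x : Int) :
    x ∈ pvRangesOf ivs ↔ ∃ p ∈ ivs, p.1 ≤ x ∧ x ≤ p.2 := by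
  simp only [pvRangesOf, List.mem_flatMap, PySem.List.mem_pyRange_one]
  constructor
  · rintro ⟨p, hp, h1, h2⟩; exact ⟨p, hp, h1, by omega⟩
  · rintro ⟨p, hp, h1, h2⟩; exact ⟨p, hp, h1, by omega⟩

theorem pvChain_pairwise (M : List (Int × Int)) (h : pvChain M) :
    (pvRangesOf M).Pairwise (· < ·) := by
  induction M with
  | nil => simp [pvRangesOf]
  | cons p M ih =>
    obtain ⟨hpw, hval⟩ := h
    rw [List.pairwise_cons] at hpw
    have : pvRangesOf (p :: M) = PySem.List.pyRange p.1 (p.2 + 1) 1 ++ pvRangesOf M := by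
      simp [pvRangesOf]
    rw [this, List.pairwise_append]
    refine ⟨PySem.List.pairwise_lt_pyRange_one _ _, ih ⟨hpw.2, fun q hq => hval q (List.mem_cons_of_mem _ hq)⟩, ?_⟩
    intro x hx y hy
    rw [PySem.List.mem_pyRange_one] at hx
    rw [mem_pvRangesOf] at hy
    obtain ⟨q, hq, hy1, _⟩ := hy
    have := hpw.1 q hq
    omega

theorem pvMerge_invariant (l : List (Int × Int)) :
    ∀ (M : List (Int × Int)),
    pvChain M →
    (∀ p ∈ M, ∀ q ∈ l, p.1 ≤ q.1) →
    l.Pairwise (fun p q => p.1 ≤ q.1) →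
    pvChain (l.foldl pvMergeStep M) ∧
    (∀ x : Int, (∃ p ∈ l.foldl pvMergeStep M, p.1 ≤ x ∧ x ≤ p.2) ↔
       (∃ p ∈ M, p.1 ≤ x ∧ x ≤ p.2) ∨ (∃ p ∈ l, p.1 ≤ x ∧ x ≤ p.2)) := by
  induction l with
  | nil => intro M hM _ _; simpa using hM
  | cons p l ih =>
    intro M hM hle hsorted
    rw [List.pairwise_cons] at hsorted
    have hple : ∀ q ∈ l, p.1 ≤ q.1 := hsorted.1
    -- analyse one step
    have step : pvChain (pvMergeStep M p) ∧
        (∀ q ∈ pvMergeStep M p, ∀ r ∈ l, q.1 ≤ r.1) ∧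
        (∀ x : Int, (∃ q ∈ pvMergeStep M p, q.1 ≤ x ∧ x ≤ q.2) ↔
          (∃ q ∈ M, q.1 ≤ x ∧ x ≤ q.2) ∨ (p.1 ≤ x ∧ x ≤ p.2)) := by
      rcases List.eq_nil_or_concat M with hnil | ⟨M₀, q, rfl⟩
      · subst hnil
        by_cases hpe : p.1 ≤ p.2 <;>
          simp only [pvMergeStep, List.getLast?_nil, hpe, if_pos, pvChain] <;>
          constructor
        · simp [hpe]
        · refine ⟨?_, ?_⟩
          · intro q hq r hr; simp at hq; subst hq; exact hple r hr
          · intro x; simp only [List.nil_append, List.mem_singleton]; simp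
        · simp
        · refine ⟨?_, ?_⟩
          · intro q hq r hr; simp at hq
          · intro x; simp; omega
      · simp only [List.concat_eq_append] at hM hle ⊢
        have hlast : (M₀ ++ [q]).getLast? = some q := by simp
        have hdl : (M₀ ++ [q]).dropLast = M₀ := by simp
        obtain ⟨hpw, hval⟩ := hM
        rw [List.pairwise_append] at hpw
        have hqv : q.1 ≤ q.2 := hval q (by simp)
        have hq_le_p : q.1 ≤ p.1 := hle q (by simp) p (List.mem_cons_self ..)
        have hM0q : ∀ r ∈ M₀, r.2 + 1 < q.1 := by
          intro r hr; simpa using hpw.2.2 r hr q (by simp)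
        by_cases hclose : p.1 ≤ q.2 + 1
        · by_cases hgrow : q.2 < p.2
          · have hstep : pvMergeStep (M₀ ++ [q]) p = M₀ ++ [(q.1, p.2)] := by
              simp [pvMergeStep, hlast, hdl, hclose, hgrow]
            rw [hstep]
            refine ⟨⟨?_, ?_⟩, ?_, ?_⟩
            · rw [List.pairwise_append]
              exact ⟨hpw.1, by simp, by intro r hr y hy; simp at hy; subst hy; exact hM0q r hr⟩
            · intro r hr
              rcases List.mem_append.1 hr with hr | hr
              · have := hval r (by simp [hr]); exact this
              · simp at hr; subst hr; omega
            · intro r hr s hs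
              rcases List.mem_append.1 hr with hr | hr
              · exact hle r (by simp [hr]) s (List.mem_cons_of_mem _ hs)
              · simp at hr; subst hr; exact le_trans hq_le_p (hple s hs)
            · intro x
              simp only [List.mem_append, List.mem_singleton]
              constructor
              · rintro ⟨r, hr | hr, h1, h2⟩
                · exact Or.inl ⟨r, by simp [hr], h1, h2⟩
                · subst hr; simp only at h1 h2
                  by_cases hx : x ≤ q.2
                  · exact Or.inl ⟨q, by simp, h1, hx⟩
                  · exact Or.inr ⟨by omega, h2⟩
              · rintro (⟨r, hr, h1, h2⟩ | ⟨h1, h2⟩)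
                · rcases hr with hr | hr
                  · exact ⟨r, Or.inl hr, h1, h2⟩
                  · rw [hr] at h1 h2; exact ⟨(q.1, p.2), Or.inr rfl, h1, by omega⟩
                · exact ⟨(q.1, p.2), Or.inr rfl, by omega, by omega⟩
          · have hstep : pvMergeStep (M₀ ++ [q]) p = M₀ ++ [q] := by
              simp [pvMergeStep, hlast, hclose, hgrow]
            rw [hstep]
            refine ⟨⟨by rw [List.pairwise_append]; exact hpw, hval⟩, ?_, ?_⟩
            · intro r hr s hs; exact hle r hr s (List.mem_cons_of_mem _ hs)
            · intro x
              constructor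
              · rintro ⟨r, hr, h1, h2⟩; exact Or.inl ⟨r, hr, h1, h2⟩
              · rintro (⟨r, hr, h1, h2⟩ | ⟨h1, h2⟩)
                · exact ⟨r, hr, h1, h2⟩
                · exact ⟨q, by simp, by omega, by omega⟩
        · by_cases hpe : p.1 ≤ p.2
          · have hstep : pvMergeStep (M₀ ++ [q]) p = (M₀ ++ [q]) ++ [p] := by
              simp [pvMergeStep, hlast, hclose, hpe]
            rw [hstep]
            refine ⟨⟨?_, ?_⟩, ?_, ?_⟩
            · rw [List.pairwise_append]
              refine ⟨by rw [List.pairwise_append]; exact hpw, by simp, ?_⟩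
              intro r hr y hy
              simp at hy; subst hy
              rcases List.mem_append.1 hr with hr | hr
              · have := hM0q r hr; omega
              · simp at hr; subst hr; omega
            · intro r hr
              rcases List.mem_append.1 hr with hr | hr
              · exact hval r hr
              · simp at hr; subst hr; exact hpe
            · intro r hr s hs
              rcases List.mem_append.1 hr with hr | hr
              · exact hle r hr s (List.mem_cons_of_mem _ hs)
              · simp at hr; subst hr; exact hple s hs
            · intro x
              simp only [List.mem_append, List.mem_singleton]
              constructor
              · rintro ⟨r, hr | hr, h1, h2⟩
                · exact Or.inl ⟨r, hr, h1, h2⟩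
                · subst hr; exact Or.inr ⟨h1, h2⟩
              · rintro (⟨r, hr, h1, h2⟩ | ⟨h1, h2⟩)
                · exact ⟨r, Or.inl hr, h1, h2⟩
                · exact ⟨p, Or.inr rfl, h1, h2⟩
          · have hstep : pvMergeStep (M₀ ++ [q]) p = M₀ ++ [q] := by
              simp [pvMergeStep, hlast, hclose, hpe]
            rw [hstep]
            refine ⟨⟨by rw [List.pairwise_append]; exact hpw, hval⟩, ?_, ?_⟩
            · intro r hr s hs; exact hle r hr s (List.mem_cons_of_mem _ hs)
            · intro x
              constructor
              · rintro ⟨r, hr, h1, h2⟩; exact Or.inl ⟨r, hr, h1, h2⟩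
              · rintro (⟨r, hr, h1, h2⟩ | ⟨h1, h2⟩)
                · exact ⟨r, hr, h1, h2⟩
                · omega
    obtain ⟨s1, s2, s3⟩ := step
    obtain ⟨c1, c2⟩ := ih (pvMergeStep M p) s1 s2 hsorted.2
    refine ⟨by simpa using c1, ?_⟩
    intro x
    rw [List.foldl_cons] at *
    rw [c2 x, s3 x]
    simp only [List.mem_cons]
    constructor
    · rintro ((h | h) | h)
      · exact Or.inl h
      · exact Or.inr ⟨p, Or.inl rfl, h⟩
      · obtain ⟨r, hr, h⟩ := h; exact Or.inr ⟨r, Or.inr hr, h⟩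
    · rintro (h | ⟨r, rfl | hr, h⟩)
      · exact Or.inl (Or.inl h)
      · exact Or.inl (Or.inr h)
      · exact Or.inr ⟨r, hr, h⟩

-- the heart: B's sort+merge+expand per topic equals A's sorted(set(...)) of the expanded IDs
theorem pvExpandTopic_eq (ivs : List (Int × Int)) :
    PySem.List.sorted (PySem.Set.ofList (pvRangesOf ivs)) (fun x => x) false = pvExpandTopic ivs := by
  unfold pvExpandTopic
  rw [PySem.List.foldl_append_eq_flatMap]
  set srt := PySem.List.sorted ivs (fun iv => iv.1) false with hsrt
  have hperm : srt.Perm ivs := PySem.List.sorted_perm ..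
  have hsorted : srt.Pairwise (fun p q => p.1 ≤ q.1) := PySem.List.sorted_pairwise ..
  obtain ⟨hchain, hcov⟩ := pvMerge_invariant srt [] (by constructor <;> simp) (by simp) hsorted
  set merged := srt.foldl pvMergeStep [] with hm
  show PySem.List.sorted (PySem.Set.ofList (pvRangesOf ivs)) (fun x => x) false = [] ++ pvRangesOf merged
  rw [List.nil_append]
  apply PySem.List.sorted_eq_of_perm_of_pairwise_lt
  · -- Perm: both nodup with the same members
    apply List.perm_of_nodup_nodup_toFinset_eq
    · exact (pvChain_pairwise merged hchain).nodup
    · exact PySem.Set.nodup_ofList _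
    · ext x
      simp only [List.mem_toFinset, PySem.Set.mem_ofList, mem_pvRangesOf]
      rw [show (∃ p ∈ merged, p.1 ≤ x ∧ x ≤ p.2) ↔ _ from hcov x]
      simp only [List.not_mem_nil, false_and, exists_false, false_or]
      constructor
      · rintro ⟨p, hp, h⟩; exact ⟨p, hperm.mem_iff.mp hp, h⟩
      · rintro ⟨p, hp, h⟩; exact ⟨p, hperm.mem_iff.mpr hp, h⟩
  · exact pvChain_pairwise merged hchain

-- pyGetD / pySetD commute with List.map (any index; the default maps too)
theorem pvPyGetD_map {α β : Type} (f : α → β) (xs : List α) (i : Int) (d : α) :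
    PySem.List.pyGetD (xs.map f) i (f d) = f (PySem.List.pyGetD xs i d) := by
  simp only [PySem.List.pyGetD, PySem.List.pyGet?, PySem.List.pyIdx?]
  simp only [List.length_map]
  split_ifs <;> simp [List.getElem?_map, Option.getD_map]

theorem pvPySetD_map {α β : Type} (f : α → β) (xs : List α) (i : Int) (v : α) :
    PySem.List.pySetD (xs.map f) i (f v) = (PySem.List.pySetD xs i v).map f := by
  simp only [PySem.List.pySetD, PySem.List.pySet?, PySem.List.pyIdx?]
  simp only [List.length_map]
  split_ifs <;> simp [List.map_set]

-- A's index loop over range(len) is B's loop over zip, once the lengths agree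
theorem pvIndex_loop_eq_zip {γ : Type} (ct : List Int) (chs : List (List (String × Int)))
    (hlen : ct.length = chs.length)
    (g : γ → Int → List (String × Int) → γ) (init : γ) :
    (PySem.List.pyRange 0 (PySem.List.len ct) 1).foldl
      (fun acc j => g acc (PySem.List.pyGetD ct j 0) (PySem.List.pyGetD chs j [])) init
    = (ct.zip chs).foldl (fun acc tc => g acc tc.1 tc.2) init := by
  have hzlen : (ct.zip chs).length = ct.length := by simp [List.length_zip, hlen]
  have h1 : (PySem.List.pyRange 0 (PySem.List.len ct) 1).foldl
      (fun acc j => g acc (PySem.List.pyGetD ct j 0) (PySem.List.pyGetD chs j [])) init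
      = (PySem.List.pyRange 0 (PySem.List.len (ct.zip chs)) 1).foldl
      (fun acc j => (fun a (tc : Int × List (String × Int)) => g a tc.1 tc.2) acc
        (PySem.List.pyGetD (ct.zip chs) j ((0 : Int), ([] : List (String × Int))))) init := by
    rw [show PySem.List.len ct = PySem.List.len (ct.zip chs) by simp [PySem.List.len_eq, hzlen]]
    apply PySem.List.foldl_congr_mem
    intro acc j hj
    rw [PySem.List.mem_pyRange_one] at hj
    have hj2 : j < (ct.zip chs).length := by
      rw [PySem.List.len_eq] at hj; exact_mod_cast hj.2
    have hjc : j < ct.length := by omega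
    have hjh : j < chs.length := by omega
    obtain ⟨n, rfl⟩ : ∃ n : Nat, j = (n : Int) := ⟨j.toNat, by omega⟩
    have hn1 : n < ct.length := by exact_mod_cast hjc
    have hn2 : n < chs.length := by exact_mod_cast hjh
    have hn3 : n < (ct.zip chs).length := by exact_mod_cast hj2
    simp only [PySem.List.pyGetD_natCast]
    rw [List.getD_eq_getElem _ _ hn3, List.getD_eq_getElem _ _ hn1, List.getD_eq_getElem _ _ hn2]
    simp [List.getElem_zip]
  rw [h1]
  have h2 := PySem.List.foldl_pyRange_pyGetD (xs := ct.zip chs)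
    (f := fun (a : γ) (tc : Int × List (String × Int)) => g a tc.1 tc.2)
    (d := ((0 : Int), ([] : List (String × Int)))) (init := init) (a := 0) (by norm_num)
  simpa using h2

-- ===== VERDICT (by name: the statement is the Claim_ definition above) =====
theorem get_segments_from_topic_spec : Claim_equal_get_segments_from_topic := by
  intro ct chs nt _ hpre
  obtain ⟨hlen, _, _⟩ := hpre
  unfold Spec_get_segments_from_topic get_segments_from_topic get_segments_from_topic_alt
  have hA := pvIndex_loop_eq_zip ct chs hlen
    (fun acc t c =>
      PySem.List.pySetD acc t (PySem.List.pyGetD acc t [] ++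
        PySem.List.pyRange ((PySem.Dict.mk c).getD "start_segment" 0)
          ((PySem.Dict.mk c).getD "end_segment" 0 + 1) 1))
    ((PySem.List.pyRange 0 nt 1).map (fun _ => ([] : List Int)))
  beta_reduce at hA
  dsimp only
  rw [hA]
  -- invariant: A's accumulator is B's accumulator mapped through pvRangesOf
  have key : ∀ (l : List (Int × List (String × Int))) (B : List (List (Int × Int))),
      l.foldl (fun acc tc =>
        PySem.List.pySetD acc tc.1 (PySem.List.pyGetD acc tc.1 [] ++
          PySem.List.pyRange ((PySem.Dict.mk tc.2).getD "start_segment" 0)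
            ((PySem.Dict.mk tc.2).getD "end_segment" 0 + 1) 1)) (B.map pvRangesOf)
      = (l.foldl (fun acc tc =>
          PySem.List.pySetD acc tc.1 (PySem.List.pyGetD acc tc.1 [] ++
            [((PySem.Dict.mk tc.2).getD "start_segment" 0, (PySem.Dict.mk tc.2).getD "end_segment" 0)])) B).map pvRangesOf := by
    intro l
    induction l with
    | nil => intro B; rfl
    | cons tc l ih =>
      intro B
      rw [List.foldl_cons, List.foldl_cons, ← ih]
      congr 1
      rw [show ([] : List Int) = pvRangesOf [] from rfl, pvPyGetD_map pvRangesOf B tc.1 []]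
      rw [show pvRangesOf (PySem.List.pyGetD B tc.1 []) ++
            PySem.List.pyRange ((PySem.Dict.mk tc.2).getD "start_segment" 0)
              ((PySem.Dict.mk tc.2).getD "end_segment" 0 + 1) 1
          = pvRangesOf (PySem.List.pyGetD B tc.1 [] ++
            [((PySem.Dict.mk tc.2).getD "start_segment" 0, (PySem.Dict.mk tc.2).getD "end_segment" 0)]) by
        simp [pvRangesOf]]
      exact pvPySetD_map pvRangesOf B tc.1 _
  have hinit : (PySem.List.pyRange 0 nt 1).map (fun _ => ([] : List Int))
      = ((PySem.List.pyRange 0 nt 1).map (fun _ => ([] : List (Int × Int)))).map pvRangesOf := by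
    simp [pvRangesOf_nil]
  rw [hinit, key]
  rw [List.map_map]
  apply List.map_congr_left
  intro ivs _
  exact pvExpandTopic_eq ivs
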